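-- pv_equiv track=rewrite | github.com/vuhung16au/ACU | compare-sort-algorithms/scripts/run_multi_size_comparison.py | get_size_names
-- ===== SOURCE A (Python) =====
-- def get_size_names(sizes):
--     # Use default names for first four, then fallback to 'size-<N>'
--     default_names = ["small", "medium", "large", "extra-large"]
--     names = []
--     for i, s in enumerate(sizes):
--         if i < len(default_names):
--             names.append(default_names[i])
--         else:
--             names.append(f"size-{s}")
--     return names
-- ===== SOURCE B (Python) =====
-- def get_size_names(sizes):
--     defaults = ["small", "medium", "large", "extra-large"]
--     names = []
--     for s in sizes:
--         names.append(defaults.pop(0) if defaults else f"size-{s}")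
--     return names
-- ===== Notes on version B (the rewrite author's own statement) =====
-- stated objective: alternative
-- what changed: Replaced the enumerate loop with an index<4 comparison and positional lookup by an index-free loop whose state is a shrinking stack of remaining default names: each step pops the next name while any remain and switches to 'size-<N>' once the stack is empty.
import Mathlib
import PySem

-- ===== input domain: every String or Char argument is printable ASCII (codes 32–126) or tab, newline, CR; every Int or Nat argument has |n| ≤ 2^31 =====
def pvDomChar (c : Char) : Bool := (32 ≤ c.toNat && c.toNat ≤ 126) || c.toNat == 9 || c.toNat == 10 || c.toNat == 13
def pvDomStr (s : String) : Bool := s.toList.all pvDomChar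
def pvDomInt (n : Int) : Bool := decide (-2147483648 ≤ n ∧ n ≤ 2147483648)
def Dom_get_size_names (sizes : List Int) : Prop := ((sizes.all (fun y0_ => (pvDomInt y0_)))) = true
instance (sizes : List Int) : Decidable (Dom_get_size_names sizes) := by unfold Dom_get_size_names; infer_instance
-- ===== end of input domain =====

-- B replaces A's indexed conditional loop by an index-free loop whose state is the stack of remaining default names.
-- ===== PORT A =====
def get_size_names (sizes : List Int) : List String :=
  let default_names : List String := ["small", "medium", "large", "extra-large"]
  (PySem.List.enumerate sizes).foldl (fun names (i, s) =>
    if (i : Int) < (default_names.length : Int) then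
      names ++ [(PySem.List.pyGet? default_names i).getD ""]
    else
      names ++ ["size-" ++ PySem.Int.toStr s]) []

-- ===== PORT B =====
-- state = (remaining default names, names built so far); pop(0) on a non-empty list is taking the head
def get_size_names_alt (sizes : List Int) : List String :=
  (sizes.foldl (fun (st : List String × List String) s =>
    match st.1 with
    | d :: ds => (ds, st.2 ++ [d])
    | [] => ([], st.2 ++ ["size-" ++ PySem.Int.toStr s]))
    (["small", "medium", "large", "extra-large"], [])).2

-- ===== PRECONDITION & SPEC =====
def Spec_get_size_names (sizes : List Int) (out : List String) : Prop := out = get_size_names_alt sizes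
instance (sizes : List Int) (out : List String) : Decidable (Spec_get_size_names sizes out) := by unfold Spec_get_size_names; infer_instance

-- ===== CLAIM (what is proved, stated in full; the proofs are below) =====
def Claim_equal_get_size_names : Prop := ∀ (sizes : List Int), Dom_get_size_names sizes → Spec_get_size_names sizes (get_size_names sizes)

-- ===== LEMMAS AND PROOFS =====

-- With the default-name stack empty, B's fold only appends "size-" entries.
theorem pv_fold_empty_stack (xs : List Int) (acc : List String) :
    (xs.foldl (fun (st : List String × List String) s =>
      match st.1 with
      | d :: ds => (ds, st.2 ++ [d])
      | [] => ([], st.2 ++ ["size-" ++ PySem.Int.toStr s])) ([], acc))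
      = ([], acc ++ xs.map (fun s => "size-" ++ PySem.Int.toStr s)) := by
  induction xs generalizing acc with
  | nil => simp
  | cons x xs ih => simp [ih]

-- Once the index has passed the four default names, A's fold only appends "size-" entries.
theorem pv_fold_tail {f : List String → Int × Int → List String}
    (hf : ∀ acc p, 4 ≤ p.1 → f acc p = acc ++ ["size-" ++ PySem.Int.toStr p.2])
    (xs : List Int) (j : Int) (hj : 4 ≤ j) (acc : List String) :
    (PySem.List.enumerate xs j).foldl f acc
      = acc ++ xs.map (fun s => "size-" ++ PySem.Int.toStr s) := by
  induction xs generalizing j acc with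
  | nil => simp [PySem.List.enumerate_nil]
  | cons x xs ih =>
      rw [PySem.List.enumerate_cons, List.foldl_cons, hf acc (j, x) hj,
        ih (j + 1) (by omega)]
      simp

-- ===== VERDICT (by name: the statement is the Claim_ definition above) =====
theorem get_size_names_spec : Claim_equal_get_size_names := by
  intro sizes _
  unfold Spec_get_size_names get_size_names get_size_names_alt
  dsimp only
  match sizes with
  | [] => rfl
  | [a] => rfl
  | [a, b] => rfl
  | [a, b, c] => rfl
  | a :: b :: c :: d :: rest =>
      simp only [PySem.List.enumerate_cons, List.foldl_cons]
      norm_num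
      rw [pv_fold_tail ?hf rest 4 (by norm_num), pv_fold_empty_stack]
      · simp
      case hf =>
        intro acc p hp
        rw [if_neg (by omega)]
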